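-- pv_equiv track=rewrite | github.com/Codetivate/stock-profit-bot | scripts/verify_against_yahoo_fiscal.py | fiscal_qtr_to_calendar
-- ===== SOURCE A (Python) =====
-- from typing import Dict, List, Optional, Tuple
--
-- def fiscal_qtr_to_calendar(
--     fiscal_year_be: int, q_num: int, fiscal_end_month: int
-- ) -> Tuple[int, int]:
--     """Return (calendar_year_be, calendar_quarter_end_month) for the
--     fiscal quarter labelled (fiscal_year_be, q_num).
--
--     q_num: 1..4
--     """
--     # Calendar end-month of fiscal Q1 = (fiscal_end_month - 9) mod 12, then
--     # add 3 months for each subsequent fiscal quarter.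
--     fiscal_end_year = fiscal_year_be
--     # Fiscal Q4 ends at fiscal_end_month of fiscal_year_be.
--     # Fiscal Q1 ends 9 months earlier.
--     months_back = (4 - q_num) * 3   # Q4: 0, Q3: 3, Q2: 6, Q1: 9
--     end_month = fiscal_end_month - months_back
--     end_year_be = fiscal_end_year
--     while end_month <= 0:
--         end_month += 12
--         end_year_be -= 1
--     return end_year_be, end_month
-- ===== SOURCE B (Python) =====
-- def fiscal_qtr_to_calendar(fiscal_year_be, q_num, fiscal_end_month):
--     """Closed-form: roll the month into 1..12 range with floor division
--     instead of the while-loop (clamped at 0 since A only rolls backwards)."""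
--     m0 = fiscal_end_month - (4 - q_num) * 3
--     k = max(0, -((m0 - 1) // 12))
--     return fiscal_year_be - k, m0 + 12 * k
-- ===== Notes on version B (the rewrite author's own statement) =====
-- stated objective: simpler
-- what changed: Replaces the iterative while-loop month/year rollback with one closed-form floor-division formula (k = max(0, -((m0-1)//12)) backward year steps).
import Mathlib
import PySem

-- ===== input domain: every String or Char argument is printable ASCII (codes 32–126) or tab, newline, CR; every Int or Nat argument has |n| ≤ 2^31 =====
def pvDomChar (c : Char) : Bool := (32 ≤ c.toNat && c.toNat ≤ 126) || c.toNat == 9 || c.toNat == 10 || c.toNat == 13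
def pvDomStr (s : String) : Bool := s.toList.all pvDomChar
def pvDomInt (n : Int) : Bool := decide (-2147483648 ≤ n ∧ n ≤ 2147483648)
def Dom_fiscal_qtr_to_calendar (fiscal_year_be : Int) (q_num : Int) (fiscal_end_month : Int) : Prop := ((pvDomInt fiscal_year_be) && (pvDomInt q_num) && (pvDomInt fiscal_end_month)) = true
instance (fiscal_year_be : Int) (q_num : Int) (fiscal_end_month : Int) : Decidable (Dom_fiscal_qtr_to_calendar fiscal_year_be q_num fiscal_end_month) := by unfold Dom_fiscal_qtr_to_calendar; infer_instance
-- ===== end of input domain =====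

-- B replaces A's while-loop month/year rollback with one closed-form floor-division formula (objective: simpler).

-- ===== PORT A =====
-- the 'while end_month <= 0' loop, as structural recursion on the loop state
def fiscalLoopA (end_month : Int) (end_year_be : Int) : Int × Int :=
  if end_month ≤ 0 then fiscalLoopA (end_month + 12) (end_year_be - 1)
  else (end_year_be, end_month)
termination_by (1 - end_month).toNat
decreasing_by
  omega

def fiscal_qtr_to_calendar (fiscal_year_be : Int) (q_num : Int) (fiscal_end_month : Int) : Int × Int :=
  let fiscal_end_year := fiscal_year_be
  let months_back := (4 - q_num) * 3
  let end_month := fiscal_end_month - months_back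
  let end_year_be := fiscal_end_year
  fiscalLoopA end_month end_year_be

-- ===== PORT B =====
def fiscal_qtr_to_calendar_alt (fiscal_year_be : Int) (q_num : Int) (fiscal_end_month : Int) : Int × Int :=
  let m0 := fiscal_end_month - (4 - q_num) * 3
  let k := max 0 (-(PySem.Int.floordiv (m0 - 1) 12))
  (fiscal_year_be - k, m0 + 12 * k)

-- ===== PRECONDITION & SPEC =====
def Spec_fiscal_qtr_to_calendar (fiscal_year_be : Int) (q_num : Int) (fiscal_end_month : Int) (out : Int × Int) : Prop := out = fiscal_qtr_to_calendar_alt fiscal_year_be q_num fiscal_end_month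
instance (fiscal_year_be : Int) (q_num : Int) (fiscal_end_month : Int) (out : Int × Int) : Decidable (Spec_fiscal_qtr_to_calendar fiscal_year_be q_num fiscal_end_month out) := by unfold Spec_fiscal_qtr_to_calendar; infer_instance

-- ===== CLAIM (what is proved, stated in full; the proofs are below) =====
def Claim_equal_fiscal_qtr_to_calendar : Prop := ∀ (fiscal_year_be : Int) (q_num : Int) (fiscal_end_month : Int), Dom_fiscal_qtr_to_calendar fiscal_year_be q_num fiscal_end_month → Spec_fiscal_qtr_to_calendar fiscal_year_be q_num fiscal_end_month (fiscal_qtr_to_calendar fiscal_year_be q_num fiscal_end_month)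

-- ===== LEMMAS AND PROOFS =====

-- floor-division bracket: q*12 ≤ x < (q+1)*12 for q = x // 12
theorem fdiv12_bracket (x : Int) :
    PySem.Int.floordiv x 12 * 12 ≤ x ∧ x < (PySem.Int.floordiv x 12 + 1) * 12 := by
  have h := PySem.Int.floordiv_mul_add_mod x 12
  have hm : 0 ≤ PySem.Int.mod x 12 ∧ PySem.Int.mod x 12 < 12 := by
    constructor
    · exact PySem.Int.mod_nonneg x (by norm_num)
    · exact PySem.Int.mod_lt x (by norm_num)
  omega

-- the loop's closed form
theorem fiscalLoopA_closed (m y : Int) :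
    fiscalLoopA m y =
      (y - max 0 (-(PySem.Int.floordiv (m - 1) 12)), m + 12 * max 0 (-(PySem.Int.floordiv (m - 1) 12))) := by
  by_cases h : m ≤ 0
  · rw [fiscalLoopA, if_pos h, fiscalLoopA_closed (m + 12) (y - 1)]
    have h1 := fdiv12_bracket (m - 1)
    have h2 := fdiv12_bracket (m + 11)
    have heq : m + 12 - 1 = m + 11 := by ring
    rw [heq]
    have : PySem.Int.floordiv (m - 1) 12 = PySem.Int.floordiv (m + 11) 12 - 1 := by omega
    simp only [Prod.mk.injEq]
    constructor <;> omega
  · rw [fiscalLoopA, if_neg h]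
    have h1 := fdiv12_bracket (m - 1)
    have : max 0 (-(PySem.Int.floordiv (m - 1) 12)) = 0 := by omega
    rw [this]
    simp only [Prod.mk.injEq]
    constructor <;> omega
termination_by (1 - m).toNat
decreasing_by omega

-- ===== VERDICT (by name: the statement is the Claim_ definition above) =====
theorem fiscal_qtr_to_calendar_spec : Claim_equal_fiscal_qtr_to_calendar := by
  intro y q m _
  unfold Spec_fiscal_qtr_to_calendar fiscal_qtr_to_calendar fiscal_qtr_to_calendar_alt
  simp only []
  rw [fiscalLoopA_closed]
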